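-- pv_equiv track=rewrite | github.com/Jullija/BitMatura | Sortowanie/SortowaniaImplementacje/HeapSort.py | insertToHeap
-- ===== SOURCE A (Python) =====
-- def left(i):
--     return 2 * i + 1
--
-- def right(i):
--     return 2 * i + 2
--
-- def parent(i):
--     return (i - 1) // 2
--
-- def heapify(T, n, idx):
--     l = left(idx)
--     r = right(idx)
--     curr_idx = idx
--     if l < n and T[curr_idx] < T[l]:
--         curr_idx = l
--     if r < n and T[curr_idx] < T[r]:
--         curr_idx = r
--     if curr_idx != idx:
--         T[idx], T[curr_idx] = T[curr_idx], T[idx]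
--         heapify(T, n, curr_idx)
--
-- def buildHeap(T):
--     n = len(T)
--     for i in range(parent(n - 1), -1, -1):
--         heapify(T, n, i)
--
-- def heapSort(T):
--     n = len(T)
--     buildHeap(T)
--     for i in range(n - 1, 0, -1):
--         T[0], T[i] = T[i], T[0]
--         heapify(T, i, 0)
--     return T
--
-- def insertToHeap(T, key):
--     T = heapSort(T)
--     n = len(T)
--     idx = n
--     T.append(key)
--     while idx > -1:
--         parent_idx = parent(idx)
--         if T[parent_idx] > key:
--             T[idx], T[parent_idx] = T[parent_idx], T[idx]
--             idx = parent_idx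
--         else:
--             return idx
-- ===== SOURCE B (Python) =====
-- def insertToHeap(T, key):
--     s = sorted(T)
--     idx = len(s)
--     while idx > 0:
--         p = (idx - 1) // 2
--         if s[p] > key:
--             idx = p
--         else:
--             return idx
--     return 0
-- ===== Notes on version B (the rewrite author's own statement) =====
-- stated objective: faster
-- what changed: B drops the entire heap machinery (buildHeap, the recursive heapify, heapSort's swap loop, the mutating bubble-up with swaps) and instead calls the library sort once and walks read-only up the parent chain of the appended slot, returning the first chain index whose parent value is not greater than the key, or 0 when the walk reaches the root.
-- intended difference: On nonempty lists whose minimum exceeds key, A's bubble-up walks past the root (index -1 wraps to the last element) and falls off the loop returning None, while B returns 0, the root index where the inserted key actually settles, which is the intended position. — e.g. on insertToHeap([5], 3): A returns none, B returns some 0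
import Mathlib
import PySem

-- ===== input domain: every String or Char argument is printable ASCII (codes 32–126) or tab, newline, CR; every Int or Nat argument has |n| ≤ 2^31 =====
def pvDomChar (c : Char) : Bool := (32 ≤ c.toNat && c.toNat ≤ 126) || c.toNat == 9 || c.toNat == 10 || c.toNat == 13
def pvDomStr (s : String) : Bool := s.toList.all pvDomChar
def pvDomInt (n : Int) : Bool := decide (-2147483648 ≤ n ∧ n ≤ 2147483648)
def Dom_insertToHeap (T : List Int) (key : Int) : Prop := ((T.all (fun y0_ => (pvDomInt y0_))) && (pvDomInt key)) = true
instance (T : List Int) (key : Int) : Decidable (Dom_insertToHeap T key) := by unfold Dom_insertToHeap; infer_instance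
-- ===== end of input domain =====

-- B replaces A's heap machinery (buildHeap + heapSort's swap loop + bubble-up over a
-- mutated list) by one library sort followed by a read-only walk up the parent chain of
-- the appended slot; on nonempty lists whose minimum exceeds key A falls off its loop and
-- returns None where B returns 0 (stated as D_ below). A also sorts its argument in
-- place — the equivalence proved here is about the return value only, as B does not mutate.

-- ===== PORT A =====
def pleft (i : Int) : Int := 2 * i + 1

def pright (i : Int) : Int := 2 * i + 2

def pparent (i : Int) : Int := PySem.Int.floordiv (i - 1) 2

-- Python's simultaneous swap  T[i], T[j] = T[j], T[i]  (indices in range at every call site)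
def pyswap (T : List Int) (i j : Int) : List Int :=
  PySem.List.pySetD (PySem.List.pySetD T i (PySem.List.pyGetD T j 0)) j (PySem.List.pyGetD T i 0)

-- curr_idx as computed by the two if-statements at the top of Python's heapify
def hchild (T : List Int) (n idx : Int) : Int :=
  let l := pleft idx
  let r := pright idx
  let c1 := if l < n ∧ PySem.List.pyGetD T idx 0 < PySem.List.pyGetD T l 0 then l else idx
  if r < n ∧ PySem.List.pyGetD T c1 0 < PySem.List.pyGetD T r 0 then r else c1

-- the two extra conjuncts 'idx < … ∧ … < n' are totality guards only: at every call A
-- makes, 0 ≤ idx, and then curr_idx ≠ idx already implies both of them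
def heapify (T : List Int) (n idx : Int) : List Int :=
  if h : hchild T n idx ≠ idx ∧ idx < hchild T n idx ∧ hchild T n idx < n then
    heapify (pyswap T idx (hchild T n idx)) n (hchild T n idx)
  else T
termination_by (n - idx).toNat
decreasing_by omega

def buildHeap (T : List Int) : List Int :=
  let n : Int := T.length
  (PySem.List.pyRange (pparent (n - 1)) (-1) (-1)).foldl (fun acc i => heapify acc n i) T

def heapSort (T : List Int) : List Int :=
  let n : Int := T.length
  let T1 := buildHeap T
  (PySem.List.pyRange (n - 1) 0 (-1)).foldl (fun acc i => heapify (pyswap acc 0 i) i 0) T1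

-- the 'while idx > -1' loop of insertToHeap (falling out of the loop returns None)
def bubble (T : List Int) (key idx : Int) : Option Int :=
  if h : idx > -1 then
    let p := pparent idx
    if PySem.List.pyGetD T p 0 > key then bubble (pyswap T idx p) key p else some idx
  else none
termination_by (idx + 1).toNat
decreasing_by
  simp only [pparent, PySem.Int.floordiv_eq_ediv_of_pos (by norm_num : (0:Int) < 2)]
  omega

def insertToHeap (T : List Int) (key : Int) : Option Int :=
  let T1 := heapSort T
  let n : Int := T1.length
  bubble (T1 ++ [key]) key n

-- ===== PORT B =====
-- the 'while idx > 0' loop of Source B; falling out of the loop returns 0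
def walk (s : List Int) (key idx : Int) : Option Int :=
  if h : idx > 0 then
    let p := PySem.Int.floordiv (idx - 1) 2
    if PySem.List.pyGetD s p 0 > key then walk s key p else some idx
  else some 0
termination_by idx.toNat
decreasing_by
  simp only [PySem.Int.floordiv_eq_ediv_of_pos (by norm_num : (0:Int) < 2)]
  omega

def insertToHeap_alt (T : List Int) (key : Int) : Option Int :=
  let s := PySem.List.sorted T (fun x => x) false
  walk s key (s.length : Int)

-- ===== PRECONDITION & SPEC =====
-- On nonempty T whose every element exceeds key, A's bubble-up walks past the root
-- (index -1 wraps to the last element) and falls off its loop returning None; B returns 0,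
-- the root index where the inserted key actually settles, which is the intended position.
def D_insertToHeap (T : List Int) (key : Int) : Prop := T ≠ [] ∧ ∀ x ∈ T, key < x
instance (T : List Int) (key : Int) : Decidable (D_insertToHeap T key) := by unfold D_insertToHeap; infer_instance

def Spec_insertToHeap (T : List Int) (key : Int) (out : Option Int) : Prop :=
  ¬ D_insertToHeap T key → out = insertToHeap_alt T key
instance (T : List Int) (key : Int) (out : Option Int) : Decidable (Spec_insertToHeap T key out) := by unfold Spec_insertToHeap; infer_instance

def pvDiffWitness_insertToHeap : List Int × Int := ([5], 3)
def pvDiffWitnessOut_insertToHeap : (Option Int) × (Option Int) := (none, some 0)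

-- ===== CLAIM (what is proved, stated in full; the proofs are below) =====
def Claim_unchanged_insertToHeap : Prop := ∀ (T : List Int) (key : Int), Dom_insertToHeap T key → Spec_insertToHeap T key (insertToHeap T key)
def Claim_changed_insertToHeap : Prop := Dom_insertToHeap (pvDiffWitness_insertToHeap.1) (pvDiffWitness_insertToHeap.2) ∧ D_insertToHeap (pvDiffWitness_insertToHeap.1) (pvDiffWitness_insertToHeap.2) ∧ insertToHeap (pvDiffWitness_insertToHeap.1) (pvDiffWitness_insertToHeap.2) = pvDiffWitnessOut_insertToHeap.1 ∧ insertToHeap_alt (pvDiffWitness_insertToHeap.1) (pvDiffWitness_insertToHeap.2) = pvDiffWitnessOut_insertToHeap.2 ∧ pvDiffWitnessOut_insertToHeap.1 ≠ pvDiffWitnessOut_insertToHeap.2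
def Claim_exact_insertToHeap : Prop := ∀ (T : List Int) (key : Int), Dom_insertToHeap T key → D_insertToHeap T key → insertToHeap T key ≠ insertToHeap_alt T key

-- ===== LEMMAS AND PROOFS =====

-- value of T at index i (all proof-relevant reads are at indices the programs keep in range)
def g (T : List Int) (i : Int) : Int := PySem.List.pyGetD T i 0

-- "every parent-child edge (pparent j, j) with j < n and b ≤ pparent j respects the max-heap order"
def hp (T : List Int) (n b : Int) : Prop :=
  ∀ j : Int, 1 ≤ j → j < n → b ≤ pparent j → g T j ≤ g T (pparent j)

-- j lies in the subtree rooted at i (the parent chain of j passes through i)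
def desc (i j : Int) : Prop := j = i ∨ (if h : 0 ≤ i ∧ i < j then desc i (pparent j) else False)
termination_by j.toNat
decreasing_by
  simp only [pparent, PySem.Int.floordiv_eq_ediv_of_pos (by norm_num : (0:Int) < 2)]
  omega

theorem pparent_eq (j : Int) : pparent j = (j - 1) / 2 := by
  simp [pparent, PySem.Int.floordiv_eq_ediv_of_pos (by norm_num : (0:Int) < 2)]

theorem pparent_lt {j : Int} (h : 1 ≤ j) : 0 ≤ pparent j ∧ pparent j < j := by
  rw [pparent_eq]; omega

theorem desc_refl (i : Int) : desc i i := by rw [desc]; left; rfl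

theorem desc_iff (i j : Int) : desc i j ↔ (j = i ∨ (0 ≤ i ∧ i < j ∧ desc i (pparent j))) := by
  rw [desc]; constructor
  · rintro (h | h); · left; exact h
    · right; split at h
      · exact ⟨by omega, by omega, h⟩
      · exact absurd h not_false
  · rintro (h | ⟨h1, h2, h3⟩); · left; exact h
    · right; rw [dif_pos ⟨h1, h2⟩]; exact h3

theorem desc_le {i j : Int} (h : desc i j) : i ≤ j := by
  rw [desc_iff] at h; rcases h with h | ⟨_, h, _⟩ <;> omega

theorem desc_step {i j : Int} (h0 : 0 ≤ i) (hij : i < j) (h : desc i (pparent j)) : desc i j := by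
  rw [desc_iff]; right; exact ⟨h0, hij, h⟩

theorem desc_inv {i j : Int} (h : desc i j) (hne : j ≠ i) : 0 ≤ i ∧ i < j ∧ desc i (pparent j) := by
  rw [desc_iff] at h; tauto

theorem desc_trans {a b c : Int} (h1 : desc a b) (h2 : desc b c) : desc a c := by
  by_cases ha : 0 ≤ a
  · induction hn : c.toNat using Nat.strong_induction_on generalizing c with
    | _ n ih =>
      by_cases he : c = b
      · subst he; exact h1
      · obtain ⟨hb0, hbc, hd⟩ := desc_inv h2 he
        have hpc := pparent_lt (j := c) (by omega)
        exact desc_step ha (by have := desc_le h1; omega) (ih (pparent c).toNat (by omega) hd rfl)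
  · have hb : b = a := by by_contra hne; exact ha (desc_inv h1 hne).1
    subst hb
    have hc : c = b := by by_contra hne; exact ha (desc_inv h2 hne).1
    subst hc; exact h1

theorem desc_zero {m : Int} (h : 0 ≤ m) : desc 0 m := by
  induction hn : m.toNat using Nat.strong_induction_on generalizing m with
  | _ n ih =>
    by_cases he : m = 0
    · subst he; exact desc_refl 0
    · have hp0 := pparent_lt (j := m) (by omega)
      exact desc_step le_rfl (by omega) (ih (pparent m).toNat (by omega) hp0.1 rfl)

-- which index hchild picks, and that it is maximal among root and valid children
theorem pparent_pleft (i : Int) : pparent (pleft i) = i := by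
  simp only [pleft]; rw [pparent_eq]; omega

theorem pparent_pright (i : Int) : pparent (pright i) = i := by
  simp only [pright]; rw [pparent_eq]; omega

theorem children_of_parent {j p : Int} (h1 : 1 ≤ j) (h : pparent j = p) :
    j = pleft p ∨ j = pright p := by
  rw [pparent_eq] at h; simp only [pleft, pright]; omega

-- which index hchild picks: either the root, and then no valid child beats it, or the
-- strictly larger of the valid children
theorem hchild_spec (T : List Int) (n idx : Int) (h0 : 0 ≤ idx) :
    (hchild T n idx = idx ∧
      (∀ o : Int, (o = pleft idx ∨ o = pright idx) → o < n → g T o ≤ g T idx)) ∨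
    (idx < hchild T n idx ∧ hchild T n idx < n ∧
      (hchild T n idx = pleft idx ∨ hchild T n idx = pright idx) ∧
      g T idx < g T (hchild T n idx) ∧
      (∀ o : Int, (o = pleft idx ∨ o = pright idx) → o < n → g T o ≤ g T (hchild T n idx))) := by
  have hlr : idx < pleft idx ∧ pleft idx < pright idx := by simp only [pleft, pright]; omega
  unfold hchild
  simp only [g]
  split_ifs with hc1 hc2 hc2
  · right
    refine ⟨by omega, hc2.1, Or.inr rfl, lt_trans hc1.2 hc2.2, ?_⟩
    rintro o (rfl | rfl) _
    · exact le_of_lt hc2.2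
    · exact le_refl _
  · right
    refine ⟨by omega, hc1.1, Or.inl rfl, hc1.2, ?_⟩
    rintro o (rfl | rfl) ho
    · exact le_refl _
    · exact not_lt.mp (fun hlt => hc2 ⟨ho, hlt⟩)
  · right
    refine ⟨by omega, hc2.1, Or.inr rfl, hc2.2, ?_⟩
    rintro o (rfl | rfl) ho
    · exact not_lt.mp (fun hlt => hc1 ⟨by omega, by exact lt_trans hc2.2 hlt⟩)
    · exact le_refl _
  · left
    refine ⟨rfl, ?_⟩
    rintro o (rfl | rfl) ho
    · exact not_lt.mp (fun hlt => hc1 ⟨ho, hlt⟩)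
    · exact not_lt.mp (fun hlt => hc2 ⟨ho, hlt⟩)

-- basic index/value lemmas about g and pyswap
theorem g_pyswap_left (T : List Int) (i j : Int) (hi0 : 0 ≤ i) (hi : i < T.length)
    (hj0 : 0 ≤ j) (hj : j < T.length) (hne : i ≠ j) : g (pyswap T i j) i = g T j := by
  simp only [pyswap, g, PySem.List.pySetD_of_nonneg _ _ hi0, PySem.List.pySetD_of_nonneg _ _ hj0]
  rw [PySem.List.pyGetD_eq_getElem _ _ hi0 (by simp; omega)]
  simp only [List.getElem_set]
  rw [if_neg (by omega)]
  rw [PySem.List.pyGetD_eq_getElem _ _ hj0 (by omega)]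
  simp

theorem g_pyswap_right (T : List Int) (i j : Int) (hi0 : 0 ≤ i) (hi : i < T.length)
    (hj0 : 0 ≤ j) (hj : j < T.length) : g (pyswap T i j) j = g T i := by
  simp only [pyswap, g, PySem.List.pySetD_of_nonneg _ _ hi0, PySem.List.pySetD_of_nonneg _ _ hj0]
  rw [PySem.List.pyGetD_eq_getElem _ _ hj0 (by simp; omega)]
  simp only [List.getElem_set, if_pos rfl]
  rw [PySem.List.pyGetD_eq_getElem _ _ hi0 (by omega)]
  simp

theorem g_pyswap_other (T : List Int) (i j m : Int) (hi0 : 0 ≤ i) (hi : i < T.length)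
    (hj0 : 0 ≤ j) (hj : j < T.length) (hm0 : 0 ≤ m) (hmi : m ≠ i) (hmj : m ≠ j) :
    g (pyswap T i j) m = g T m := by
  by_cases hm : (m : Int) < T.length
  · simp only [pyswap, g, PySem.List.pySetD_of_nonneg _ _ hi0, PySem.List.pySetD_of_nonneg _ _ hj0]
    rw [PySem.List.pyGetD_eq_getElem _ _ hm0 (by simp; omega), PySem.List.pyGetD_eq_getElem _ _ hm0 (by omega)]
    simp only [List.getElem_set]
    rw [if_neg (by omega), if_neg (by omega)]
  · simp only [pyswap, g, PySem.List.pySetD_of_nonneg _ _ hi0, PySem.List.pySetD_of_nonneg _ _ hj0]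
    rw [PySem.List.pyGetD_of_none _ _ _ (by simp [PySem.List.pyGet?_eq_none_iff, PySem.Raise.InRange]; omega),
        PySem.List.pyGetD_of_none _ _ _ (by simp [PySem.List.pyGet?_eq_none_iff, PySem.Raise.InRange]; omega)]

theorem length_pyswap (T : List Int) (i j : Int) (hi0 : 0 ≤ i) (hi : i < T.length)
    (hj0 : 0 ≤ j) (hj : j < T.length) : (pyswap T i j).length = T.length := by
  simp [pyswap, PySem.List.length_pySetD]

theorem perm_pyswap (T : List Int) (i j : Int) (hi0 : 0 ≤ i) (hi : i < T.length)
    (hj0 : 0 ≤ j) (hj : j < T.length) : (pyswap T i j).Perm T := by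
  have h1 : PySem.List.pyGetD T j 0 = T[j.toNat]'(by omega) := PySem.List.pyGetD_eq_getElem _ _ hj0 hj
  have h2 : PySem.List.pyGetD T i 0 = T[i.toNat]'(by omega) := PySem.List.pyGetD_eq_getElem _ _ hi0 hi
  simp only [pyswap, PySem.List.pySetD_of_nonneg _ _ hi0, PySem.List.pySetD_of_nonneg _ _ hj0, h1, h2]
  exact List.set_set_perm (by omega) (by omega)

-- in a region that is a heap above root r, every subtree value is at most the root value
theorem subtree_le_root {T : List Int} {n r : Int} (hr : 0 ≤ r) (hhp : hp T n r)
    {m : Int} (hd : desc r m) (hm : m < n) : g T m ≤ g T r := by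
  induction hn : m.toNat using Nat.strong_induction_on generalizing m with
  | _ k ih =>
    by_cases he : m = r
    · subst he; exact le_refl _
    · obtain ⟨_, hrm, hd'⟩ := desc_inv hd he
      have hpm := pparent_lt (j := m) (by omega)
      exact le_trans (hhp m (by omega) hm (desc_le hd'))
        (ih (pparent m).toNat (by omega) hd' (by omega) rfl)

-- the main heapify lemma: heap order restored at the root, permutation, untouched
-- positions outside the subtree, and subtree values keep any upper bound
theorem heapify_spec (T : List Int) (n idx : Int) :
    0 ≤ idx → idx < n → n ≤ (T.length : Int) → hp T n (idx + 1) →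
    hp (heapify T n idx) n idx ∧
    (heapify T n idx).Perm T ∧
    (∀ m : Int, 0 ≤ m → ¬(desc idx m ∧ m < n) → g (heapify T n idx) m = g T m) ∧
    (∀ b : Int, (∀ m : Int, desc idx m → m < n → g T m ≤ b) →
      (∀ m : Int, desc idx m → m < n → g (heapify T n idx) m ≤ b)) := by
  induction hk : (n - idx).toNat using Nat.strong_induction_on generalizing T idx with
  | _ k ih =>
  intro h0 h1 h2 hpre
  rw [heapify]
  rcases hchild_spec T n idx h0 with ⟨hcid, hmaxid⟩ | ⟨hlt, hcn, hchd, hgt, hmax⟩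
  · rw [dif_neg (fun hcon => hcon.1 hcid)]
    refine ⟨?_, List.Perm.refl _, fun m _ _ => rfl, fun b hb m hd hm => hb m hd hm⟩
    intro j h1j hjn hbj
    by_cases hpj' : idx + 1 ≤ pparent j
    · exact hpre j h1j hjn hpj'
    · have hpj : pparent j = idx := by omega
      rw [hpj]
      exact hmaxid j (children_of_parent h1j hpj) hjn
  · set c := hchild T n idx with hc
    rw [dif_pos ⟨by omega, hlt, hcn⟩]
    set U := pyswap T idx c with hU
    have hlenU : U.length = T.length :=
      length_pyswap T idx c h0 (by omega) (by omega) (by omega)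
    have hUi : g U idx = g T c :=
      g_pyswap_left T idx c h0 (by omega) (by omega) (by omega) (by omega)
    have hUc : g U c = g T idx :=
      g_pyswap_right T idx c h0 (by omega) (by omega) (by omega)
    have hUo : ∀ m : Int, 0 ≤ m → m ≠ idx → m ≠ c → g U m = g T m := fun m hm hne1 hne2 =>
      g_pyswap_other T idx c m h0 (by omega) (by omega) (by omega) hm hne1 hne2
    have hparc : pparent c = idx := by
      rcases hchd with h | h
      · rw [h, pparent_pleft]
      · rw [h, pparent_pright]
    have hdc : desc idx c := desc_step h0 hlt (hparc ▸ desc_refl idx)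
    have hpTc : hp T n c := fun j a b c' => hpre j a b (by omega)
    have hpreU : hp U n (c + 1) := by
      intro j h1j hjn hbj
      have hpl := pparent_lt h1j
      rw [hUo j (by omega) (by omega) (by omega), hUo (pparent j) (by omega) (by omega) (by omega)]
      exact hpre j h1j hjn (by omega)
    obtain ⟨R1, R2, R3, R4⟩ :=
      ih (n - c).toNat (by omega) U c (by omega) (by omega) hcn (by omega) hpreU
    have hT'idx : g (heapify U n c) idx = g T c := by
      rw [R3 idx h0 (fun hcon => by have := desc_le hcon.1; omega), hUi]
    have hboundc : ∀ m : Int, desc c m → m < n → g U m ≤ g T c := by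
      intro m hdm hmn
      by_cases hmc : m = c
      · rw [hmc, hUc]; exact le_of_lt hgt
      · have h3 := desc_inv hdm hmc
        rw [hUo m (by omega) (by omega) hmc]
        exact subtree_le_root (by omega) hpTc hdm hmn
    have hT'c_le : g (heapify U n c) c ≤ g T c := R4 (g T c) hboundc c (desc_refl c) hcn
    refine ⟨?_, R2.trans (perm_pyswap T idx c h0 (by omega) (by omega) (by omega)), ?_, ?_⟩
    · intro j h1j hjn hbj
      by_cases hcb : c ≤ pparent j
      · exact R1 j h1j hjn hcb
      · by_cases hpj : pparent j = idx
        · by_cases hjc : j = c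
          · rw [hpj, hT'idx, hjc]; exact hT'c_le
          · have hjgt := (pparent_lt h1j).2
            have hnd : ¬ desc c j := fun hd => by
              have h5 := desc_le (desc_inv hd hjc).2.2; omega
            rw [hpj, hT'idx, R3 j (by omega) (fun hcon => hnd hcon.1),
                hUo j (by omega) (by omega) hjc]
            exact hmax j (children_of_parent h1j hpj) hjn
        · have hpl2 := pparent_lt h1j
          have hcle : c ≤ 2 * idx + 2 := by
            rcases hchd with h | h <;> rw [h] <;> simp only [pleft, pright] <;> omega
          have hj3 : 2 * pparent j ≤ j - 1 := by rw [pparent_eq]; omega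
          have hjgtc : c < j := by omega
          have hndj : ¬ desc c j := fun hd => hcb (desc_le (desc_inv hd (by omega)).2.2)
          have hndp : ¬ desc c (pparent j) := fun hd => hcb (desc_le hd)
          rw [R3 j (by omega) (fun hcon => hndj hcon.1),
              R3 (pparent j) (by omega) (fun hcon => hndp hcon.1),
              hUo j (by omega) (by omega) (by omega),
              hUo (pparent j) (by omega) (by omega) (by omega)]
          exact hpre j h1j hjn (by omega)
    · intro m hm0 hnd
      have hndc : ¬(desc c m ∧ m < n) := fun hcon => hnd ⟨desc_trans hdc hcon.1, hcon.2⟩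
      have hm1 : m ≠ idx := fun he => hnd ⟨he ▸ desc_refl idx, he ▸ h1⟩
      have hm2 : m ≠ c := fun he => hnd ⟨he ▸ hdc, he ▸ hcn⟩
      rw [R3 m hm0 hndc, hUo m hm0 hm1 hm2]
    · intro b hb m hdm hmn
      have hbU : ∀ m' : Int, desc c m' → m' < n → g U m' ≤ b := by
        intro m' hdm' hmn'
        by_cases hmc : m' = c
        · rw [hmc, hUc]; exact hb idx (desc_refl idx) h1
        · have h3 := desc_inv hdm' hmc
          rw [hUo m' (by omega) (by omega) hmc]
          exact hb m' (desc_trans hdc hdm') hmn'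
      by_cases hdcm : desc c m
      · exact R4 b hbU m hdcm hmn
      · have hm0 : 0 ≤ m := by have := desc_le hdm; omega
        rw [R3 m hm0 (fun hcon => hdcm hcon.1)]
        by_cases hmi : m = idx
        · rw [hmi, hUi]; exact hb c hdc hcn
        · rw [hUo m hm0 hmi (fun he => hdcm (he ▸ desc_refl c))]
          exact hb m hdm hmn

theorem g_neg_one (X : List Int) (h : X ≠ []) : g X (-1) = g X ((X.length : Int) - 1) := by
  have hl : 0 < X.length := List.length_pos_iff.mpr h
  rw [g, g, PySem.List.pyGetD_neg_one X 0 h,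
      PySem.List.pyGetD_eq_getElem _ _ (by omega) (by omega)]
  rw [List.getLast_eq_getElem]
  congr 1
  omega

theorem build_loop (n i : Int) : ∀ (T : List Int), n ≤ (T.length : Int) → -1 ≤ i →
    i ≤ pparent (n - 1) → hp T n (i + 1) →
    hp ((PySem.List.pyRange i (-1) (-1)).foldl (fun acc k => heapify acc n k) T) n 0 ∧
    ((PySem.List.pyRange i (-1) (-1)).foldl (fun acc k => heapify acc n k) T).Perm T := by
  induction hk : (i + 1).toNat using Nat.strong_induction_on generalizing i with
  | _ k ih =>
  intro T h2 hi1 hip hpT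
  by_cases h : i ≤ -1
  · have hi : i = -1 := by omega
    subst hi
    rw [PySem.List.pyRange_neg_one_eq_nil (by omega)]
    simp only [List.foldl_nil]
    refine ⟨?_, List.Perm.refl _⟩
    have he : (-1 : Int) + 1 = 0 := by omega
    rwa [he] at hpT
  · have hi0 : 0 ≤ i := by omega
    have hn2 : 0 ≤ pparent (n - 1) := by omega
    have hin : i < n := by have := pparent_eq (n - 1); omega
    rw [PySem.List.pyRange_neg_one_cons (by omega : (-1 : Int) < i)]
    simp only [List.foldl_cons]
    obtain ⟨S1, S2, S3, S4⟩ := heapify_spec T n i hi0 hin h2 hpT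
    have hlen' : n ≤ ((heapify T n i).length : Int) := by rw [S2.length_eq]; exact h2
    have hpT' : hp (heapify T n i) n (i - 1 + 1) := by
      have he : i - 1 + 1 = i := by omega
      rwa [he]
    obtain ⟨B1, B2⟩ := ih (i - 1 + 1).toNat (by omega) (i - 1) rfl (heapify T n i) hlen'
      (by omega) (by omega) hpT'
    exact ⟨B1, B2.trans S2⟩

theorem buildHeap_spec (T : List Int) :
    hp (buildHeap T) (T.length : Int) 0 ∧ (buildHeap T).Perm T := by
  have hinit : hp T (T.length : Int) (pparent ((T.length : Int) - 1) + 1) := by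
    intro j h1j hjn hbj
    exfalso
    rw [pparent_eq] at hbj
    have := pparent_eq j
    omega
  have h := build_loop (T.length : Int) (pparent ((T.length : Int) - 1)) T (le_refl _)
    (by rw [pparent_eq]; omega) (le_refl _) hinit
  exact h

theorem sort_loop (n i : Int) : ∀ (T : List Int), n = (T.length : Int) → 0 ≤ i → i < n →
    hp T (i + 1) 0 →
    (∀ a b : Int, i + 1 ≤ a → a ≤ b → b < n → g T a ≤ g T b) →
    (∀ a b : Int, 0 ≤ a → a ≤ i → i + 1 ≤ b → b < n → g T a ≤ g T b) →
    ((PySem.List.pyRange i 0 (-1)).foldl (fun acc k => heapify (pyswap acc 0 k) k 0) T).Perm T ∧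
    (∀ a b : Int, 0 ≤ a → a ≤ b → b < n →
      g ((PySem.List.pyRange i 0 (-1)).foldl (fun acc k => heapify (pyswap acc 0 k) k 0) T) a ≤
      g ((PySem.List.pyRange i 0 (-1)).foldl (fun acc k => heapify (pyswap acc 0 k) k 0) T) b) := by
  induction hk : i.toNat using Nat.strong_induction_on generalizing i with
  | _ k ih =>
  intro T hn hi0 hin hpT hsuf hcross
  by_cases hz : i ≤ 0
  · have hieq : i = 0 := by omega
    subst hieq
    rw [PySem.List.pyRange_neg_one_eq_nil (le_refl 0)]
    simp only [List.foldl_nil]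
    refine ⟨List.Perm.refl _, ?_⟩
    intro a b ha hab hbn
    rcases eq_or_lt_of_le hab with he | hl
    · subst he; exact le_refl _
    · by_cases ha0 : a = 0
      · subst ha0; exact hcross 0 b (le_refl 0) (le_refl 0) (by omega) hbn
      · exact hsuf a b (by omega) hab hbn
  · have hi1 : 1 ≤ i := by omega
    have hn2 : 2 ≤ n := by omega
    rw [PySem.List.pyRange_neg_one_cons (by omega : (0 : Int) < i)]
    simp only [List.foldl_cons]
    have hUi : g (pyswap T 0 i) i = g T 0 :=
      g_pyswap_right T 0 i (le_refl 0) (by omega) (by omega) (by omega)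
    have hU0 : g (pyswap T 0 i) 0 = g T i :=
      g_pyswap_left T 0 i (le_refl 0) (by omega) (by omega) (by omega) (by omega)
    have hUo : ∀ m : Int, 0 < m → m ≠ i → g (pyswap T 0 i) m = g T m := fun m hm1 hm2 =>
      g_pyswap_other T 0 i m (le_refl 0) (by omega) (by omega) (by omega) (by omega)
        (by omega) hm2
    have hmax0 : ∀ m : Int, 0 ≤ m → m ≤ i → g T m ≤ g T 0 := fun m hm0 hmi =>
      subtree_le_root (le_refl 0) hpT (desc_zero hm0) (by omega)
    have hpreU : hp (pyswap T 0 i) i 1 := by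
      intro j h1j hji hbj
      have hpl := pparent_lt h1j
      rw [hUo j (by omega) (by omega), hUo (pparent j) (by omega) (by omega)]
      exact hpT j h1j (by omega) (by omega)
    have hlenU : ((pyswap T 0 i).length : Int) = n := by
      rw [length_pyswap T 0 i (le_refl 0) (by omega) (by omega) (by omega)]; omega
    obtain ⟨S1, S2, S3, S4⟩ :=
      heapify_spec (pyswap T 0 i) i 0 (le_refl 0) (by omega) (by omega) hpreU
    have hlen2 : ((heapify (pyswap T 0 i) i 0).length : Int) = n := by
      rw [S2.length_eq]; exact hlenU
    have hT2suf : ∀ m : Int, i ≤ m → g (heapify (pyswap T 0 i) i 0) m = g (pyswap T 0 i) m :=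
      fun m hm => S3 m (by omega) (fun hcon => by omega)
    have hT2bd : ∀ m : Int, 0 ≤ m → m < i → g (heapify (pyswap T 0 i) i 0) m ≤ g T 0 := by
      intro m hm0 hmi
      refine S4 (g T 0) ?_ m (desc_zero hm0) hmi
      intro m' hdm' hm'i
      have hm'0 : 0 ≤ m' := by have := desc_le hdm'; omega
      by_cases h0' : m' = 0
      · rw [h0', hU0]; exact hmax0 i (by omega) (le_refl i)
      · rw [hUo m' (by omega) (by omega)]; exact hmax0 m' hm'0 (by omega)
    have hp2 : hp (heapify (pyswap T 0 i) i 0) (i - 1 + 1) 0 := by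
      have he : i - 1 + 1 = i := by omega
      rwa [he]
    have suf2 : ∀ a b : Int, i - 1 + 1 ≤ a → a ≤ b → b < n →
        g (heapify (pyswap T 0 i) i 0) a ≤ g (heapify (pyswap T 0 i) i 0) b := by
      intro a b ha hab hbn
      rw [hT2suf a (by omega), hT2suf b (by omega)]
      by_cases hai : a = i
      · subst hai
        by_cases hbi : b = a
        · subst hbi; exact le_refl _
        · rw [hUi, hUo b (by omega) (by omega)]
          exact hcross 0 b (le_refl 0) (by omega) (by omega) hbn
      · rw [hUo a (by omega) hai, hUo b (by omega) (by omega)]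
        exact hsuf a b (by omega) hab hbn
    have cross2 : ∀ a b : Int, 0 ≤ a → a ≤ i - 1 → i - 1 + 1 ≤ b → b < n →
        g (heapify (pyswap T 0 i) i 0) a ≤ g (heapify (pyswap T 0 i) i 0) b := by
      intro a b ha0 hai hb hbn
      refine le_trans (hT2bd a ha0 (by omega)) ?_
      rw [hT2suf b (by omega)]
      by_cases hbi : b = i
      · rw [hbi, hUi]
      · rw [hUo b (by omega) hbi]
        exact hcross 0 b (le_refl 0) (by omega) (by omega) hbn
    obtain ⟨P1, P2⟩ := ih (i - 1).toNat (by omega) (i - 1) rfl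
      (heapify (pyswap T 0 i) i 0) hlen2.symm (by omega) (by omega) hp2 suf2 cross2
    exact ⟨P1.trans (S2.trans (perm_pyswap T 0 i (le_refl 0) (by omega) (by omega) (by omega))),
      P2⟩

theorem heapSort_eq_sorted (T : List Int) :
    heapSort T = PySem.List.sorted T (fun x => x) false := by
  by_cases hT : T = []
  · subst hT
    rfl
  · have hlen1 : 1 ≤ (T.length : Int) := by
      have := List.length_pos_iff.mpr hT; omega
    obtain ⟨H1, H2⟩ := buildHeap_spec T
    have hlenB : ((buildHeap T).length : Int) = (T.length : Int) := by
      rw [H2.length_eq]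
    have hpB : hp (buildHeap T) ((T.length : Int) - 1 + 1) 0 := by
      have he : (T.length : Int) - 1 + 1 = (T.length : Int) := by omega
      rwa [he]
    obtain ⟨P1, P2⟩ := sort_loop (T.length : Int) ((T.length : Int) - 1) (buildHeap T)
      hlenB.symm (by omega) (by omega) hpB
      (fun a b ha hab hbn => absurd hbn (by omega))
      (fun a b ha0 hai hb hbn => absurd hbn (by omega))
    have hR : heapSort T =
        (PySem.List.pyRange ((T.length : Int) - 1) 0 (-1)).foldl
          (fun acc k => heapify (pyswap acc 0 k) k 0) (buildHeap T) := rfl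
    rw [hR]
    refine (PySem.List.sorted_id_eq_of_perm_of_pairwise T _ (P1.trans H2) ?_).symm
    rw [List.pairwise_iff_getElem]
    intro p q hp' hq' hpq
    have hlenR : ((PySem.List.pyRange ((T.length : Int) - 1) 0 (-1)).foldl
        (fun acc k => heapify (pyswap acc 0 k) k 0) (buildHeap T)).length = T.length :=
      (P1.trans H2).length_eq
    have hp2 : p < T.length := hlenR ▸ hp'
    have hq2 : q < T.length := hlenR ▸ hq'
    have h := P2 (p : Int) (q : Int) (by positivity) (by exact_mod_cast hpq.le)
      (by exact_mod_cast hq2)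
    rw [g, g, PySem.List.pyGetD_eq_getElem _ _ (by positivity) (by rw [hlenR]; exact_mod_cast hp2),
        PySem.List.pyGetD_eq_getElem _ _ (by positivity) (by rw [hlenR]; exact_mod_cast hq2)] at h
    simpa using h

-- the two loops agree step for step; the hroot invariant records that idx = 0 is only
-- reached through a swap at the root, which the hnk hypothesis (some element of s is ≤ key)
-- rules out, so outside D_ the walks return the same index
theorem bubble_eq_walk (s : List Int) (key : Int) (hnk : s ≠ [] → g s 0 ≤ key) :
    ∀ (idx : Int) (T : List Int),
    0 ≤ idx → idx ≤ (s.length : Int) →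
    T.length = s.length + 1 →
    (∀ m : Int, 0 ≤ m → m < idx → g T m = g s m) →
    (idx = (s.length : Int) → g T (-1) = key) →
    (idx < (s.length : Int) → key < g T (-1)) →
    (idx = 0 → s ≠ [] → key < g s 0) →
    bubble T key idx = walk s key idx := by
  intro idx T
  induction hk : idx.toNat using Nat.strong_induction_on generalizing idx T with
  | _ k ih =>
  intro h0 h1 hlen hag htop hbig hroot
  rw [bubble, walk]
  by_cases hpos : idx > 0
  · rw [dif_pos (by omega : idx > -1), dif_pos hpos]
    simp only [pparent]
    have hpl := pparent_lt (j := idx) (by omega)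
    rw [pparent_eq] at hpl
    have hpE : PySem.Int.floordiv (idx - 1) 2 = (idx - 1) / 2 :=
      PySem.Int.floordiv_eq_ediv_of_pos (by norm_num)
    rw [hpE]
    have hagp : PySem.List.pyGetD T ((idx - 1) / 2) 0 = PySem.List.pyGetD s ((idx - 1) / 2) 0 := by
      have := hag ((idx - 1) / 2) (by omega) (by omega)
      simpa [g] using this
    rw [hagp]
    by_cases hgt : PySem.List.pyGetD s ((idx - 1) / 2) 0 > key
    · rw [if_pos hgt, if_pos hgt]
      have hE2 : pparent idx = (idx - 1) / 2 := pparent_eq idx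
      rw [← hE2]
      have hswlen : (pyswap T idx (pparent idx)).length = T.length :=
        length_pyswap T idx _ h0 (by omega) (by rw [hE2]; omega) (by rw [hE2]; omega)
      refine ih (pparent idx).toNat (by rw [hE2]; omega) (pparent idx)
        (pyswap T idx (pparent idx)) rfl (by rw [hE2]; omega) (by rw [hE2]; omega)
        (by rw [hswlen]; exact hlen) ?_ ?_ ?_ ?_
      · intro m hm0 hmp
        rw [hE2] at hmp
        rw [g_pyswap_other T idx (pparent idx) m h0 (by omega) (by rw [hE2]; omega)
          (by rw [hE2]; omega) hm0 (by omega) (by rw [hE2]; omega)]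
        exact hag m hm0 (by omega)
      · intro hpe
        exact absurd hpe (by rw [hE2]; omega)
      · intro hplt
        have hTne : pyswap T idx (pparent idx) ≠ [] :=
          List.length_pos_iff.mp (by rw [hswlen, hlen]; omega)
        rw [g_neg_one _ hTne]
        have hlen2 : ((pyswap T idx (pparent idx)).length : Int) - 1 = (s.length : Int) := by
          rw [hswlen, hlen]; push_cast; omega
        rw [hlen2]
        by_cases hie : idx = (s.length : Int)
        · rw [← hie,
            g_pyswap_left T idx (pparent idx) h0 (by omega) (by rw [hE2]; omega)
              (by rw [hE2]; omega) (by rw [hE2]; omega)]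
          have hgg : g T (pparent idx) = g s (pparent idx) :=
            hag _ (by rw [hE2]; omega) (by rw [hE2]; omega)
          rw [hgg, g, hE2]
          exact hgt
        · have hlt2 : idx < (s.length : Int) := by omega
          rw [g_pyswap_other T idx (pparent idx) ((s.length : Int)) h0 (by omega)
            (by rw [hE2]; omega) (by rw [hE2]; omega) (by positivity) (by omega)
            (by rw [hE2]; omega)]
          have hb := hbig hlt2
          rw [g_neg_one T (by intro hnil; rw [hnil] at hlen; simp at hlen)] at hb
          have hlenT : (T.length : Int) - 1 = (s.length : Int) := by rw [hlen]; push_cast; omega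
          rwa [hlenT] at hb
      · intro hpe hsne
        rw [hE2] at hpe
        have : g s 0 > key := by rw [← hpe]; exact hgt
        omega
    · rw [if_neg hgt, if_neg hgt]
  · have hidx0 : idx = 0 := by omega
    subst hidx0
    rw [dif_pos (by omega : (0 : Int) > -1), dif_neg (by omega : ¬ ((0 : Int) > 0))]
    simp only [pparent]
    rw [(by decide : PySem.Int.floordiv (0 - 1 : Int) 2 = (-1 : Int))]
    by_cases hsnil : s = []
    · subst hsnil
      have hkey : g T (-1) = key := htop (by simp)
      rw [g] at hkey
      rw [hkey, if_neg (by omega)]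
    · exact absurd (hnk hsnil) (not_le.mpr (hroot rfl hsnil))

-- inside D_ every parent on the chain exceeds key, so A's loop walks past the root and
-- falls out returning None
theorem bubble_none (s : List Int) (key : Int) (hsne : s ≠ []) (hall : ∀ x ∈ s, key < x) :
    ∀ (idx : Int) (T : List Int),
    0 ≤ idx → idx ≤ (s.length : Int) →
    T.length = s.length + 1 →
    (∀ m : Int, 0 ≤ m → m < idx → g T m = g s m) →
    (idx < (s.length : Int) → key < g T (-1)) →
    (idx = (s.length : Int) → g T (-1) = key) →
    bubble T key idx = none := by
  intro idx T
  induction hk : idx.toNat using Nat.strong_induction_on generalizing idx T with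
  | _ k ih =>
  intro h0 h1 hlen hag hbig htop
  rw [bubble]
  have hspos : 0 < s.length := List.length_pos_iff.mpr hsne
  by_cases hpos : idx > 0
  · rw [dif_pos (by omega : idx > -1)]
    simp only [pparent]
    have hpl := pparent_lt (j := idx) (by omega)
    rw [pparent_eq] at hpl
    have hpE : PySem.Int.floordiv (idx - 1) 2 = (idx - 1) / 2 :=
      PySem.Int.floordiv_eq_ediv_of_pos (by norm_num)
    rw [hpE]
    have hagp : PySem.List.pyGetD T ((idx - 1) / 2) 0 = PySem.List.pyGetD s ((idx - 1) / 2) 0 := by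
      have := hag ((idx - 1) / 2) (by omega) (by omega)
      simpa [g] using this
    have hmem : PySem.List.pyGetD s ((idx - 1) / 2) 0 ∈ s := by
      rw [PySem.List.pyGetD_eq_getElem _ _ (by omega) (by omega)]
      exact List.getElem_mem _
    have hgt : PySem.List.pyGetD T ((idx - 1) / 2) 0 > key := by
      rw [hagp]; exact hall _ hmem
    rw [if_pos hgt]
    have hE2 : pparent idx = (idx - 1) / 2 := pparent_eq idx
    rw [← hE2]
    have hswlen : (pyswap T idx (pparent idx)).length = T.length :=
      length_pyswap T idx _ h0 (by omega) (by rw [hE2]; omega) (by rw [hE2]; omega)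
    refine ih (pparent idx).toNat (by rw [hE2]; omega) (pparent idx)
      (pyswap T idx (pparent idx)) rfl (by rw [hE2]; omega) (by rw [hE2]; omega)
      (by rw [hswlen]; exact hlen) ?_ ?_ ?_
    · intro m hm0 hmp
      rw [hE2] at hmp
      rw [g_pyswap_other T idx (pparent idx) m h0 (by omega) (by rw [hE2]; omega)
        (by rw [hE2]; omega) hm0 (by omega) (by rw [hE2]; omega)]
      exact hag m hm0 (by omega)
    · intro hplt
      have hTne : pyswap T idx (pparent idx) ≠ [] :=
        List.length_pos_iff.mp (by rw [hswlen, hlen]; omega)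
      rw [g_neg_one _ hTne]
      have hlen2 : ((pyswap T idx (pparent idx)).length : Int) - 1 = (s.length : Int) := by
        rw [hswlen, hlen]; push_cast; omega
      rw [hlen2]
      by_cases hie : idx = (s.length : Int)
      · rw [← hie,
          g_pyswap_left T idx (pparent idx) h0 (by omega) (by rw [hE2]; omega)
            (by rw [hE2]; omega) (by rw [hE2]; omega)]
        have hgg : g T (pparent idx) = g s (pparent idx) :=
          hag _ (by rw [hE2]; omega) (by rw [hE2]; omega)
        rw [hgg, g, hE2]
        exact hgt.trans_eq hagp
      · have hlt2 : idx < (s.length : Int) := by omega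
        rw [g_pyswap_other T idx (pparent idx) ((s.length : Int)) h0 (by omega)
          (by rw [hE2]; omega) (by rw [hE2]; omega) (by positivity) (by omega)
          (by rw [hE2]; omega)]
        have hb := hbig hlt2
        rw [g_neg_one T (by intro hnil; rw [hnil] at hlen; simp at hlen)] at hb
        have hlenT : (T.length : Int) - 1 = (s.length : Int) := by rw [hlen]; push_cast; omega
        rwa [hlenT] at hb
    · intro hpe
      exact absurd hpe (by rw [hE2]; omega)
  · have hidx0 : idx = 0 := by omega
    subst hidx0
    rw [dif_pos (by omega : (0 : Int) > -1)]
    simp only [pparent]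
    rw [(by decide : PySem.Int.floordiv (0 - 1 : Int) 2 = (-1 : Int))]
    have hb : key < g T (-1) := hbig (by exact_mod_cast hspos)
    rw [if_pos (by rw [g] at hb; omega)]
    rw [bubble, dif_neg (by omega : ¬ ((-1 : Int) > -1))]

-- B's walk always returns a value
theorem walk_isSome (s : List Int) (key : Int) : ∀ idx : Int, (walk s key idx).isSome := by
  intro idx
  induction hk : idx.toNat using Nat.strong_induction_on generalizing idx with
  | _ k ih =>
  rw [walk]
  by_cases hpos : idx > 0
  · rw [dif_pos hpos]
    have hpE : PySem.Int.floordiv (idx - 1) 2 = (idx - 1) / 2 :=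
      PySem.Int.floordiv_eq_ediv_of_pos (by norm_num)
    by_cases hgt : PySem.List.pyGetD s (PySem.Int.floordiv (idx - 1) 2) 0 > key
    · rw [if_pos hgt]
      exact ih (PySem.Int.floordiv (idx - 1) 2).toNat (by rw [hpE]; omega) _ rfl
    · rw [if_neg hgt]; rfl
  · rw [dif_neg hpos]; rfl

-- shared facts about A's initial call, phrased over s = sorted(T)
theorem insertToHeap_eq_bubble (T : List Int) (key : Int) :
    insertToHeap T key =
      bubble (PySem.List.sorted T (fun x => x) false ++ [key]) key
        ((PySem.List.sorted T (fun x => x) false).length : Int) := by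
  unfold insertToHeap
  rw [heapSort_eq_sorted]

theorem init_ag (s : List Int) (key : Int) :
    ∀ m : Int, 0 ≤ m → m < (s.length : Int) → g (s ++ [key]) m = g s m := by
  intro m hm0 hmi
  rw [g, g, PySem.List.pyGetD_eq_getElem _ _ hm0 (by simp; omega),
      PySem.List.pyGetD_eq_getElem _ _ hm0 (by omega)]
  rw [List.getElem_append_left (by omega)]

-- ===== VERDICT (by name: the statements are the Claim_ definitions above) =====
theorem insertToHeap_spec : Claim_unchanged_insertToHeap := by
  intro T key _
  unfold Spec_insertToHeap
  intro hnD
  unfold D_insertToHeap at hnD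
  rw [insertToHeap_eq_bubble]
  unfold insertToHeap_alt
  set s := PySem.List.sorted T (fun x => x) false with hs
  have hnk : s ≠ [] → g s 0 ≤ key := by
    intro hsne
    rcases List.exists_cons_of_ne_nil hsne with ⟨m, t, hmt⟩
    have hTne : T ≠ [] := by
      intro h; rw [h] at hs; simp [hs] at hsne; exact hsne rfl
    rcases not_and_or.mp hnD with h | h
    · exact absurd hTne (by simpa using h)
    · push_neg at h
      rcases h with ⟨x, hxT, hxk⟩
      have hle : m ≤ x :=
        PySem.List.key_head_sorted_le T (fun y => y) (hs.symm.trans hmt) x hxT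
      have hg0 : g s 0 = m := by
        rw [g, hmt, PySem.List.pyGetD_eq_getElem _ _ (le_refl 0) (by simp)]
        simp
      omega
  refine bubble_eq_walk s key hnk _ _ (by positivity) le_rfl (by simp) (init_ag s key) ?_
    (by intro h; omega) ?_
  · intro _
    exact PySem.List.pyGetD_neg_one_append_singleton _ key 0
  · intro h0 hsne
    exact absurd (List.length_pos_iff.mpr hsne) (by omega)

theorem sorted5 : PySem.List.sorted [5] (fun x : Int => x) false = [5] := by decide

theorem insertToHeap_changed : Claim_changed_insertToHeap := by
  unfold Claim_changed_insertToHeap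
  refine ⟨by decide, by decide, ?_, ?_, by decide⟩
  · show insertToHeap [5] 3 = none
    rw [insertToHeap_eq_bubble, sorted5]
    exact bubble_none [5] 3 (by decide) (by decide) _ _ (by norm_num) le_rfl (by norm_num)
      (init_ag [5] 3) (by intro h; norm_num at h)
      (by intro _; exact PySem.List.pyGetD_neg_one_append_singleton _ 3 0)
  · show insertToHeap_alt [5] 3 = some 0
    simp only [insertToHeap_alt, sorted5]
    rw [walk]
    norm_num [PySem.Int.floordiv]
    rw [walk]
    norm_num

theorem insertToHeap_tight : Claim_exact_insertToHeap := by
  intro T key _ hD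
  obtain ⟨hTne, hall⟩ := hD
  rw [insertToHeap_eq_bubble]
  unfold insertToHeap_alt
  set s := PySem.List.sorted T (fun x => x) false with hs
  have hsne : s ≠ [] := by
    intro h
    exact hTne (by rwa [hs, PySem.List.sorted_eq_nil_iff] at h)
  have halls : ∀ x ∈ s, key < x := by
    intro x hx
    exact hall x ((PySem.List.mem_sorted T (fun y => y) false x).mp (hs ▸ hx))
  have hA : bubble (s ++ [key]) key ((s.length : Int)) = none :=
    bubble_none s key hsne halls _ _ (by positivity) le_rfl (by simp) (init_ag s key)
      (by intro h; omega)
      (by intro _; exact PySem.List.pyGetD_neg_one_append_singleton _ key 0)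
  rw [hA]
  intro hcon
  have := walk_isSome s key ((s.length : Int))
  rw [← hcon] at this
  simp at this
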